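-- pv_equiv track=rewrite | github.com/zybj3/534_3 | part3.py | getRootIndex
-- ===== SOURCE A (Python) =====
-- def getRootIndex(dict_f, data):
--     min_error = 100000000
--     root_index = 0
--     for feature in dict_f.keys():
--         error = getError(data, feature)
--         if error < min_error:
--             min_error = error
--             root_index = feature
--     return root_index
--
-- def getError(data, f_index):
--     error = 0
--     for i in range(0, len(data)):
--         if data[i][f_index] == 1:
--             if data[i][len(data[0]) - 2] == 0:
--                 error += data[i][len(data[0]) - 1]
--         else:
--             if data[i][len(data[0]) - 2] == 1:
--                 error += data[i][len(data[0]) - 1]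
--     return error
-- ===== SOURCE B (Python) =====
-- def getRootIndex(dict_f, data):
--     # One row-major pass builds an error table, then the original argmin scan.
--     errs = {f: 0 for f in dict_f}
--     for row in data:
--         cols = len(data[0])
--         label = row[cols - 2]
--         w = row[cols - 1]
--         errs = {f: e + (w if ((row[f] == 1 and label == 0) or
--                               (row[f] != 1 and label == 1)) else 0)
--                 for f, e in errs.items()}
--     min_error = 100000000
--     root_index = 0
--     for f in dict_f:
--         e = errs[f]
--         if e < min_error:
--             min_error = e
--             root_index = f
--     return root_index
-- ===== Notes on version B (the rewrite author's own statement) =====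
-- stated objective: alternative
-- what changed: Replaces A's per-feature column scans (getError called once for every feature, each rescanning all rows) by a single row-major pass that accumulates every feature's weighted error in one table, followed by the same sentinel-and-strict-< argmin scan.
-- outside the precondition, e.g. on getRootIndex({0: 0}, [[1, 1, 5], [0, 0]]): A returns 0, B raises IndexError; on getRootIndex({}, [[]]): A returns 0, B raises IndexError
import Mathlib
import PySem

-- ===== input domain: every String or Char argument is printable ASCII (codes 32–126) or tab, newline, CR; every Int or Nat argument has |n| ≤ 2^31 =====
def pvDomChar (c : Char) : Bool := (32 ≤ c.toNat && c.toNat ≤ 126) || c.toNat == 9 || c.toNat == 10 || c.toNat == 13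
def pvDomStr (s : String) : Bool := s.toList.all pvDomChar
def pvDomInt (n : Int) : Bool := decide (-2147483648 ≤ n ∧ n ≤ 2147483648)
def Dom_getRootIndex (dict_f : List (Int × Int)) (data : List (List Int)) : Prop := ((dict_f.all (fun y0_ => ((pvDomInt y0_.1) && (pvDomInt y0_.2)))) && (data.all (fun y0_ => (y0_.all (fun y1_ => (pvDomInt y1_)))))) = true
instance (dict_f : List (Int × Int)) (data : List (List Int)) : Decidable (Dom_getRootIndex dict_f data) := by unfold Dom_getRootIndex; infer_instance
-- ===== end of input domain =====

-- B replaces A's per-feature column scans (getError once per feature) by a single row-major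
-- pass that accumulates all features' weighted errors in one table, then the same argmin scan.

-- ===== PORT A =====
-- getError(data, f_index): column scan; row accesses are exact under Pre_ (out of range Python raises)
def getError (data : List (List Int)) (f_index : Int) : Int :=
  (List.range data.length).foldl (fun (error : Int) (i : Nat) =>
    let row := (PySem.List.pyGet? data (i : Int)).getD []
    let d0 := (PySem.List.pyGet? data 0).getD []
    if ((PySem.List.pyGet? row f_index).getD 0) == 1 then
      if ((PySem.List.pyGet? row ((d0.length : Int) - 2)).getD 0) == 0 then
        error + (PySem.List.pyGet? row ((d0.length : Int) - 1)).getD 0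
      else error
    else
      if ((PySem.List.pyGet? row ((d0.length : Int) - 2)).getD 0) == 1 then
        error + (PySem.List.pyGet? row ((d0.length : Int) - 1)).getD 0
      else error) 0

def getRootIndex (dict_f : List (Int × Int)) (data : List (List Int)) : Int :=
  (dict_f.foldl (fun (s : Int × Int) p =>
    let error := getError data p.1
    if error < s.1 then (error, p.1) else s) ((100000000 : Int), (0 : Int))).2

-- ===== PORT B =====
-- one row of Source B's table-building loop: errs = {f: e + (w if misclassified else 0) for f, e in errs.items()}
-- (keys of errs are distinct, so the dict comprehension is a map over the association list)
def pvRowStep (data : List (List Int)) (errs : List (Int × Int)) (row : List Int) : List (Int × Int) :=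
  let cols : Int := ((data.headD []).length : Int)
  let label := (PySem.List.pyGet? row (cols - 2)).getD 0
  let w := (PySem.List.pyGet? row (cols - 1)).getD 0
  errs.map (fun fe =>
    let rf := (PySem.List.pyGet? row fe.1).getD 0
    (fe.1, fe.2 + (if (rf == 1 && label == 0) || (!(rf == 1) && label == 1) then w else 0)))

def getRootIndex_alt (dict_f : List (Int × Int)) (data : List (List Int)) : Int :=
  let errs0 : List (Int × Int) := (PySem.List.dedup (dict_f.map (·.1))).map (fun f => (f, (0 : Int)))
  let errs := data.foldl (pvRowStep data) errs0
  (dict_f.foldl (fun (s : Int × Int) p =>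
    let e := (errs.lookup p.1).getD 0   -- errs[f]; the key is always present
    if e < s.1 then (e, p.1) else s) ((100000000 : Int), (0 : Int))).2

-- ===== PRECONDITION & SPEC =====
-- Pre_ requires every row access (each feature column, and the label/weight columns
-- len(data[0])-2 and len(data[0])-1) to be a valid Python index for every row; it excludes
-- inputs where such an access is out of range, on some of which A still returns because it
-- never reaches the weight column (no misclassified row) or never scans at all (empty dict_f),
-- while B performs those accesses unconditionally and raises IndexError there.
def Pre_getRootIndex (dict_f : List (Int × Int)) (data : List (List Int)) : Prop :=
  ∀ row ∈ data,
    (∀ p ∈ dict_f, (PySem.List.pyGet? row p.1).isSome = true) ∧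
    (PySem.List.pyGet? row (((data.headD []).length : Int) - 2)).isSome = true ∧
    (PySem.List.pyGet? row (((data.headD []).length : Int) - 1)).isSome = true
instance (dict_f : List (Int × Int)) (data : List (List Int)) : Decidable (Pre_getRootIndex dict_f data) := by unfold Pre_getRootIndex; infer_instance

def pvWitness_getRootIndex : (List (Int × Int)) × List (List Int) := ([(0, 0)], [[1, 0, 5]])

def Spec_getRootIndex (dict_f : List (Int × Int)) (data : List (List Int)) (out : Int) : Prop := out = getRootIndex_alt dict_f data
instance (dict_f : List (Int × Int)) (data : List (List Int)) (out : Int) : Decidable (Spec_getRootIndex dict_f data out) := by unfold Spec_getRootIndex; infer_instance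

-- ===== CLAIM (what is proved, stated in full; the proofs are below) =====
def Claim_equal_getRootIndex : Prop := ∀ (dict_f : List (Int × Int)) (data : List (List Int)), Dom_getRootIndex dict_f data → Pre_getRootIndex dict_f data → Spec_getRootIndex dict_f data (getRootIndex dict_f data)

-- ===== LEMMAS AND PROOFS =====

-- contribution of one row to feature f's error (proof-only abbreviation)
def pvContrib (data : List (List Int)) (f : Int) (row : List Int) : Int :=
  let cols : Int := ((data.headD []).length : Int)
  let label := (PySem.List.pyGet? row (cols - 2)).getD 0
  let w := (PySem.List.pyGet? row (cols - 1)).getD 0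
  let rf := (PySem.List.pyGet? row f).getD 0
  if (rf == 1 && label == 0) || (!(rf == 1) && label == 1) then w else 0

theorem lookup_rowStep (data : List (List Int)) (row : List Int) (errs : List (Int × Int)) (f : Int) :
    (pvRowStep data errs row).lookup f = (errs.lookup f).map (· + pvContrib data f row) := by
  induction errs with
  | nil => simp [pvRowStep]
  | cons fe rest ih =>
    simp only [pvRowStep, List.map_cons, List.lookup] at *
    by_cases h : f == fe.1
    · obtain rfl := eq_of_beq h
      simp [pvContrib]
    · simp only [h]
      exact ih

theorem lookup_fold (data : List (List Int)) (rows : List (List Int)) (errs : List (Int × Int)) (f : Int) :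
    ((rows.foldl (pvRowStep data) errs).lookup f)
      = (errs.lookup f).map (· + (rows.map (pvContrib data f)).sum) := by
  induction rows generalizing errs with
  | nil => cases h : errs.lookup f <;> simp [h]
  | cons r rs ih =>
    simp only [List.foldl_cons, ih, lookup_rowStep, List.map_cons, List.sum_cons]
    cases errs.lookup f <;> simp [add_assoc]

theorem lookup_zero_map (K : List Int) (f : Int) (hf : f ∈ K) :
    (K.map (fun g => (g, (0 : Int)))).lookup f = some 0 := by
  induction K with
  | nil => cases hf
  | cons k ks ih =>
    by_cases h : f = k
    · subst h; simp [List.lookup]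
    · have hmem : f ∈ ks := (List.mem_cons.mp hf).resolve_left h
      have hb : (f == k) = false := by simp [h]
      simpa [List.lookup, hb] using ih hmem

theorem getError_eq_sum (data : List (List Int)) (f : Int) :
    getError data f = (data.map (pvContrib data f)).sum := by
  unfold getError
  have hstep : ∀ (e : Int) (i : Nat),
      (fun error i =>
        let row := (PySem.List.pyGet? data (i : Int)).getD []
        let d0 := (PySem.List.pyGet? data 0).getD []
        if ((PySem.List.pyGet? row f).getD 0) == 1 then
          if ((PySem.List.pyGet? row ((d0.length : Int) - 2)).getD 0) == 0 then
            error + (PySem.List.pyGet? row ((d0.length : Int) - 1)).getD 0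
          else error
        else
          if ((PySem.List.pyGet? row ((d0.length : Int) - 2)).getD 0) == 1 then
            error + (PySem.List.pyGet? row ((d0.length : Int) - 1)).getD 0
          else error) e i
      = e + pvContrib data f ((PySem.List.pyGet? data (i : Int)).getD []) := by
    intro e i
    simp only [pvContrib, PySem.List.pyGet?_zero]
    have hd0 : data.headD [] = (data[0]?).getD [] := by cases data <;> rfl
    rw [hd0]
    set row := (PySem.List.pyGet? data (i : Int)).getD []
    set cols : Int := (((data[0]?).getD []).length : Int)
    set rf := (PySem.List.pyGet? row f).getD 0
    set label := (PySem.List.pyGet? row (cols - 2)).getD 0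
    set w := (PySem.List.pyGet? row (cols - 1)).getD 0
    by_cases h1 : rf == 1 <;> by_cases h2 : label == 0 <;> by_cases h3 : label == 1 <;>
      simp_all
  rw [PySem.List.foldl_congr_mem _ _
        (fun (e : Int) (i : Nat) => e + pvContrib data f ((PySem.List.pyGet? data (i : Int)).getD [])) _
        (fun acc x _ => hstep acc x)]
  rw [PySem.List.foldl_add, zero_add]
  congr 1
  apply List.ext_getElem
  · simp
  · intro i h1 h2
    simp only [List.getElem_map, List.getElem_range, PySem.List.pyGet?_natCast]
    have h3 : i < data.length := by simpa using h2
    rw [List.getElem?_eq_getElem h3]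
    rfl

theorem getRootIndex_eq_alt (dict_f : List (Int × Int)) (data : List (List Int)) :
    getRootIndex dict_f data = getRootIndex_alt dict_f data := by
  unfold getRootIndex getRootIndex_alt
  congr 1
  apply PySem.List.foldl_congr_mem
  intro s p hp
  have hk : p.1 ∈ PySem.List.dedup (dict_f.map (·.1)) := by
    rw [PySem.List.mem_dedup]
    exact List.mem_map_of_mem hp
  have hlk := lookup_fold data data ((PySem.List.dedup (dict_f.map (·.1))).map (fun f => (f, (0 : Int)))) p.1
  rw [lookup_zero_map _ _ hk] at hlk
  simp only [hlk, Option.map_some, Option.getD_some, zero_add]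
  rw [getError_eq_sum]

-- ===== VERDICT (by name: the statement is the Claim_ definition above) =====
theorem getRootIndex_spec : Claim_equal_getRootIndex := by
  intro dict_f data _ _
  unfold Spec_getRootIndex
  exact getRootIndex_eq_alt dict_f data
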